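-- pv_equiv track=rewrite | github.com/withNoclout/LeetCode_Easy | quiz_2639_FindWidthOFColumn.py | findColumnWidth
-- ===== SOURCE A (Python) =====
-- def findColumnWidth(grid):
--     """
--     :type grid: List[List[int]]
--     :rtype: List[int]
--     """
--     m , n = len(grid )  , len(grid[0])
--
--     ans  = [0] * n
--
--     for j in range(n)  :
--         max_len = 0
--         for i in range( m)  :
--             num = grid[i][j]
--             length = len(str( abs(num)))  if num >= 0  else len(str(abs(num ))) +  1
--             max_len  = max(max_len , length )
--
--         ans[j] = max_len
--
--     return ans
-- ===== SOURCE B (Python) =====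
-- def findColumnWidth(grid):
--     lo = list(grid[0])
--     hi = list(grid[0])
--     for row in grid[1:]:
--         lo = [min(a, b) for a, b in zip(lo, row)]
--         hi = [max(a, b) for a, b in zip(hi, row)]
--     return [max(len(str(a)), len(str(b))) for a, b in zip(lo, hi)]
-- ===== Notes on version B (the rewrite author's own statement) =====
-- stated objective: alternative
-- what changed: Instead of taking len(str(.)) of every cell in column-major nested index loops, B folds row-wise over the grid maintaining each column's numeric minimum and maximum, and takes the string length only of the two extremes per column (display width is monotone in magnitude within each sign).
import Mathlib
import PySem

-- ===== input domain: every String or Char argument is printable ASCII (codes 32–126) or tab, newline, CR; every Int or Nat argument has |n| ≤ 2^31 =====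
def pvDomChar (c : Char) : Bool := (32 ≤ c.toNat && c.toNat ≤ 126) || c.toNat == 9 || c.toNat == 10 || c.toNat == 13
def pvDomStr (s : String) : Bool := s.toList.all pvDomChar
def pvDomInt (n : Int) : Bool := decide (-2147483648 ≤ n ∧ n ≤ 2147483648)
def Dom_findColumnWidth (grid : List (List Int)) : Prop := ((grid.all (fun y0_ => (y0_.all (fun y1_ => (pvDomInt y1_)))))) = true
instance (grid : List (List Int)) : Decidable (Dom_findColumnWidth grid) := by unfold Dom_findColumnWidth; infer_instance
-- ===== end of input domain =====

-- B replaces A's per-cell string-length scan by a row-wise fold keeping each column's numeric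
-- minimum and maximum, taking len(str(·)) only of the two extremes per column (equal because
-- display width is monotone in magnitude within each sign).

-- ===== PORT A =====
def findColumnWidth (grid : List (List Int)) : List Int :=
  let m : Int := PySem.List.len grid
  let n : Int := PySem.List.len (PySem.List.pyGetD grid 0 [])
  let ans : List Int := List.replicate n.toNat 0
  (PySem.List.pyRange 0 n 1).foldl (fun ans j =>
    let maxLen :=
      (PySem.List.pyRange 0 m 1).foldl (fun maxLen i =>
        let num := PySem.List.pyGetD (PySem.List.pyGetD grid i []) j 0
        let length : Int :=
          if num ≥ 0 then PySem.Str.len (PySem.Int.toStr |num|)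
          else PySem.Str.len (PySem.Int.toStr |num|) + 1
        max maxLen length) 0
    PySem.List.pySetD ans j maxLen) ans

-- ===== PORT B =====
def findColumnWidth_alt (grid : List (List Int)) : List Int :=
  let first := PySem.List.pyGetD grid 0 []
  let p := (grid.drop 1).foldl
    (fun (p : List Int × List Int) row =>
      ((p.1.zip row).map (fun ab => min ab.1 ab.2),
       (p.2.zip row).map (fun ab => max ab.1 ab.2)))
    (first, first)
  (p.1.zip p.2).map (fun ab =>
    max (PySem.Str.len (PySem.Int.toStr ab.1)) (PySem.Str.len (PySem.Int.toStr ab.2)))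

-- ===== PRECONDITION & SPEC =====
-- Pre_ excludes exactly the inputs on which A raises: the empty grid (grid[0] is an
-- IndexError) and ragged grids with a row shorter than the first row (grid[i][j] raises).
def Pre_findColumnWidth (grid : List (List Int)) : Prop :=
  grid ≠ [] ∧ ∀ row ∈ grid, (grid.headD []).length ≤ row.length
instance (grid : List (List Int)) : Decidable (Pre_findColumnWidth grid) := by
  unfold Pre_findColumnWidth; infer_instance
def pvWitness_findColumnWidth : List (List Int) := [[1, -23], [456, 7]]

def Spec_findColumnWidth (grid : List (List Int)) (out : List Int) : Prop := out = findColumnWidth_alt grid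
instance (grid : List (List Int)) (out : List Int) : Decidable (Spec_findColumnWidth grid out) := by unfold Spec_findColumnWidth; infer_instance

-- ===== CLAIM (what is proved, stated in full; the proofs are below) =====
def Claim_equal_findColumnWidth : Prop := ∀ (grid : List (List Int)), Dom_findColumnWidth grid → Pre_findColumnWidth grid → Spec_findColumnWidth grid (findColumnWidth grid)

-- ===== LEMMAS AND PROOFS =====

-- number of decimal digits of a natural number (as printed by str)
def digLen (n : Nat) : Nat :=
  if h : n < 10 then 1 else digLen (n / 10) + 1
decreasing_by exact Nat.div_lt_self (by omega) (by omega)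

lemma digLen_lt10 {n : Nat} (h : n < 10) : digLen n = 1 := by
  rw [digLen]; simp [h]

lemma digLen_ge10 {n : Nat} (h : ¬ n < 10) : digLen n = digLen (n / 10) + 1 := by
  rw [digLen]; simp [h]

lemma one_le_digLen (n : Nat) : 1 ≤ digLen n := by
  rw [digLen]; split <;> omega

-- Python's len(str(x)) as a function of the integer x
def slen (x : Int) : Int := (digLen x.natAbs : Int) + (if x < 0 then 1 else 0)

lemma toDigitsCore_len : ∀ (f n : Nat) (l : List Char), n < f →
    (Nat.toDigitsCore 10 f n l).length = digLen n + l.length := by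
  intro f
  induction f with
  | zero => intro n l h; omega
  | succ f ih =>
    intro n l h
    rw [Nat.toDigitsCore]
    by_cases h10 : n / 10 = 0
    · have hn : n < 10 := by omega
      rw [digLen_lt10 hn]
      simp [h10]; omega
    · have hlt : n / 10 < f := by
        have := Nat.div_lt_self (by omega : 0 < n) (by omega : 1 < 10); omega
      simp only [h10, if_false]
      rw [ih (n / 10) _ hlt]
      rw [digLen_ge10 (show ¬ n < 10 by omega)]
      simp [List.length]; omega

lemma len_toChars (x : Int) : ((PySem.Int.toChars x).length : Int) = slen x := by
  unfold PySem.Int.toChars Nat.toDigits slen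
  by_cases hx : x < 0
  · simp only [hx, if_true, List.length_cons]
    rw [toDigitsCore_len _ _ _ (Nat.lt_succ_self _)]
    push_cast; simp
  · simp only [hx, if_false]
    rw [toDigitsCore_len _ _ _ (Nat.lt_succ_self _)]
    have : x.toNat = x.natAbs := by omega
    rw [this]; push_cast; simp

lemma strlen_toStr (x : Int) : PySem.Str.len (PySem.Int.toStr x) = slen x := by
  rw [PySem.Str.len_eq]
  rw [PySem.Int.toList_toStr]
  exact len_toChars x

-- A's branch formula equals len(str(x))
lemma slenA_eq (x : Int) :
    (if x ≥ 0 then PySem.Str.len (PySem.Int.toStr |x|)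
     else PySem.Str.len (PySem.Int.toStr |x|) + 1) = slen x := by
  rw [strlen_toStr]
  by_cases hx : x ≥ 0
  · rw [if_pos hx, abs_of_nonneg hx]
  · rw [if_neg hx, abs_of_neg (by omega)]
    unfold slen
    have h1 : (-x).natAbs = x.natAbs := by omega
    rw [h1]
    split_ifs <;> omega

lemma digLen_mono : ∀ a b : Nat, a ≤ b → digLen a ≤ digLen b := by
  intro a
  induction a using Nat.strong_induction_on with
  | _ a ih =>
    intro b hab
    by_cases ha : a < 10
    · rw [digLen_lt10 ha]
      exact one_le_digLen b
    · have hb : ¬ b < 10 := by omega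
      rw [digLen_ge10 ha, digLen_ge10 hb]
      have := ih (a / 10) (Nat.div_lt_self (by omega) (by omega)) (b / 10)
        (Nat.div_le_div_right hab)
      omega

lemma one_le_slen (x : Int) : 1 ≤ slen x := by
  unfold slen
  have := one_le_digLen x.natAbs
  split <;> omega

lemma slen_between {lo x hi : Int} (h1 : lo ≤ x) (h2 : x ≤ hi) :
    slen x ≤ max (slen lo) (slen hi) := by
  by_cases hx : 0 ≤ x
  · have : slen x ≤ slen hi := by
      unfold slen
      have hhi : 0 ≤ hi := le_trans hx h2
      have : x.natAbs ≤ hi.natAbs := by omega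
      have := digLen_mono _ _ this
      split_ifs <;> omega
    omega
  · have : slen x ≤ slen lo := by
      unfold slen
      have hlo : lo < 0 := by omega
      have : x.natAbs ≤ lo.natAbs := by omega
      have := digLen_mono _ _ this
      split_ifs <;> omega
    omega

lemma foldl_max_le_of_forall {g : Int → Int} {M acc : Int} :
    ∀ (l : List Int), (∀ x ∈ l, g x ≤ M) → acc ≤ M →
      l.foldl (fun a x => max a (g x)) acc ≤ M := by
  intro l
  induction l generalizing acc with
  | nil => intro _ h; exact h
  | cons y t ih =>
    intro hall hacc
    simp only [List.foldl_cons]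
    exact ih (fun x hx => hall x (List.mem_cons_of_mem _ hx))
      (max_le hacc (hall y (List.mem_cons_self)))

-- the core column fact: running max of len(str(·)) over a nonempty column equals
-- the larger of len(str(min)) and len(str(max))
lemma column_width (x0 : Int) (xs : List Int) :
    (x0 :: xs).foldl (fun acc x => max acc (slen x)) 0
      = max (slen (xs.foldl min x0)) (slen (xs.foldl max x0)) := by
  set mn := xs.foldl min x0 with hmn
  set mx := xs.foldl max x0 with hmx
  have hminle := PySem.List.foldl_min_le xs x0
  have hmaxle := PySem.List.le_foldl_max xs x0
  have hmem_mn : mn ∈ x0 :: xs := by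
    rcases PySem.List.foldl_min_mem xs x0 with h | h
    · rw [hmn, h]; exact List.mem_cons_self
    · exact List.mem_cons_of_mem _ h
  have hmem_mx : mx ∈ x0 :: xs := by
    rcases PySem.List.foldl_max_mem xs x0 with h | h
    · rw [hmx, h]; exact List.mem_cons_self
    · exact List.mem_cons_of_mem _ h
  have hbig := PySem.List.le_foldl_max_int (x0 :: xs) slen 0
  apply le_antisymm
  · apply foldl_max_le_of_forall
    · intro x hx
      have hlo : mn ≤ x := by
        rcases List.mem_cons.mp hx with h | h
        · rw [h]; exact hminle.1
        · exact hminle.2 x h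
      have hhi : x ≤ mx := by
        rcases List.mem_cons.mp hx with h | h
        · rw [h]; exact hmaxle.1
        · exact hmaxle.2 x h
      exact slen_between hlo hhi
    · have := one_le_slen mn; omega
  · exact max_le (hbig.2 mn hmem_mn) (hbig.2 mx hmem_mx)

-- A's outer loop: fold of in-place assignments over range(n) builds the map
lemma foldl_pySetD_range (f : Int → Int) :
    ∀ (k : Nat) (pre tail : List Int), tail.length = k →
      (PySem.List.pyRange (pre.length : Int) ((pre.length : Int) + (k : Int)) 1).foldl
          (fun a j => PySem.List.pySetD a j (f j)) (pre ++ tail)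
        = pre ++ (PySem.List.pyRange (pre.length : Int) ((pre.length : Int) + (k : Int)) 1).map f := by
  intro k
  induction k with
  | zero =>
    intro pre tail htail
    rw [List.length_eq_zero_iff.mp htail]
    rw [PySem.List.pyRange_one_eq_nil (by omega)]
    simp
  | succ k ih =>
    intro pre tail htail
    rcases tail with _ | ⟨t, ts⟩
    · simp at htail
    have hb : ((pre.length : Int) + ((k : Nat) + 1 : Nat)) = ((pre.length : Int) + 1) + (k : Nat) := by
      push_cast; ring
    rw [hb, PySem.List.pyRange_one_cons (by omega)]
    simp only [List.foldl_cons, List.map_cons]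
    have hset : PySem.List.pySetD (pre ++ t :: ts) (pre.length : Int) (f pre.length)
        = (pre ++ [f (pre.length : Int)]) ++ ts := by
      rw [PySem.List.pySetD_natCast]
      rw [List.set_append_right _ _ (le_refl _)]
      simp
    rw [hset]
    have htail' : ts.length = k := by simpa using htail
    have hrec := ih (pre ++ [f (pre.length : Int)]) ts htail'
    have hlen : (((pre ++ [f (pre.length : Int)]).length : Nat) : Int) = (pre.length : Int) + 1 := by
      simp
    rw [hlen] at hrec
    rw [hrec]
    simp

-- B's running-extreme fold splits into two independent list folds
lemma fold_pair_split (rest : List (List Int)) :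
    ∀ (lo hi : List Int),
      rest.foldl
        (fun (p : List Int × List Int) row =>
          ((p.1.zip row).map (fun ab => min ab.1 ab.2),
           (p.2.zip row).map (fun ab => max ab.1 ab.2))) (lo, hi)
      = (rest.foldl (fun l row => (l.zip row).map (fun ab => min ab.1 ab.2)) lo,
         rest.foldl (fun l row => (l.zip row).map (fun ab => max ab.1 ab.2)) hi) := by
  induction rest with
  | nil => intro lo hi; rfl
  | cons row rest ih => intro lo hi; simp only [List.foldl_cons]; exact ih _ _

-- one running zip-fold: its length and entries (entry j is the op-fold of column j)
lemma zipfold_spec (op : Int → Int → Int) :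
    ∀ (rest : List (List Int)) (lo : List Int),
      (∀ row ∈ rest, lo.length ≤ row.length) →
      (rest.foldl (fun l row => (l.zip row).map (fun ab => op ab.1 ab.2)) lo).length = lo.length ∧
      ∀ (j : Nat) (h1 : j < (rest.foldl (fun l row => (l.zip row).map (fun ab => op ab.1 ab.2)) lo).length)
        (h2 : j < lo.length),
        (rest.foldl (fun l row => (l.zip row).map (fun ab => op ab.1 ab.2)) lo)[j]
          = (rest.map (fun r => r.getD j 0)).foldl op lo[j] := by
  intro rest
  induction rest with
  | nil =>
    intro lo _
    exact ⟨rfl, by intro j h1 h2; simp⟩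
  | cons row rest ih =>
    intro lo hrows
    have hrow : lo.length ≤ row.length := hrows row (List.mem_cons_self)
    simp only [List.foldl_cons, List.map_cons]
    have hstep : ((lo.zip row).map (fun ab => op ab.1 ab.2)).length = lo.length := by
      simp [List.length_zip]; omega
    have hrec := ih ((lo.zip row).map (fun ab => op ab.1 ab.2))
      (by intro r hr; rw [hstep]; exact hrows r (List.mem_cons_of_mem _ hr))
    refine ⟨by rw [hrec.1, hstep], ?_⟩
    intro j h1 h2
    have h2' : j < ((lo.zip row).map (fun ab => op ab.1 ab.2)).length := by
      rw [hstep]; exact h2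
    rw [hrec.2 j h1 h2']
    have hjr : j < row.length := lt_of_lt_of_le h2 hrow
    have he : ((lo.zip row).map (fun ab => op ab.1 ab.2))[j]'h2' = op lo[j] row[j] := by
      simp [List.getElem_zip]
    rw [he]
    have hgd : row.getD j 0 = row[j] := List.getD_eq_getElem _ _ hjr
    rw [hgd]

-- ===== VERDICT (by name: the statement is the Claim_ definition above) =====
theorem findColumnWidth_spec : Claim_equal_findColumnWidth := by
  intro grid hdom hpre
  obtain ⟨hne, hrows⟩ := hpre
  rcases grid with _ | ⟨r0, rest⟩
  · exact absurd rfl hne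
  have hrows' : ∀ row ∈ rest, r0.length ≤ row.length := by
    intro row hrow
    simpa using hrows row (List.mem_cons_of_mem _ hrow)
  unfold Spec_findColumnWidth findColumnWidth findColumnWidth_alt
  simp only [PySem.List.len_eq, PySem.List.pyGetD_zero_cons, List.drop_succ_cons, List.drop_zero]
  rw [fold_pair_split]
  have hsetfold := foldl_pySetD_range
    (fun j => (PySem.List.pyRange 0 (((r0 :: rest).length : Int)) 1).foldl
      (fun maxLen i =>
        max maxLen
          (if PySem.List.pyGetD (PySem.List.pyGetD (r0 :: rest) i []) j 0 ≥ 0 then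
            PySem.Str.len (PySem.Int.toStr |PySem.List.pyGetD (PySem.List.pyGetD (r0 :: rest) i []) j 0|)
          else PySem.Str.len (PySem.Int.toStr |PySem.List.pyGetD (PySem.List.pyGetD (r0 :: rest) i []) j 0|) + 1))
      0)
    r0.length [] (List.replicate r0.length 0) (by simp)
  simp only [List.length_nil, Nat.cast_zero, zero_add, List.nil_append] at hsetfold
  rw [show List.replicate (((r0.length : Int)).toNat) (0 : Int) = List.replicate r0.length 0 by simp]
  rw [hsetfold]
  have hmin := zipfold_spec min rest r0 hrows'
  have hmax := zipfold_spec max rest r0 hrows'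
  apply List.ext_getElem
  · simp [PySem.List.length_pyRange_one, List.length_zip, hmin.1, hmax.1]
  · intro j hj1 hj2
    simp only [List.getElem_map, PySem.List.getElem_pyRange_one, zero_add, List.getElem_zip]
    rw [PySem.List.foldl_pyRange_zero_pyGetD' (r0 :: rest) []
      (fun maxLen row =>
        max maxLen
          (if PySem.List.pyGetD row ((j : Int)) 0 ≥ 0 then
            PySem.Str.len (PySem.Int.toStr |PySem.List.pyGetD row ((j : Int)) 0|)
          else PySem.Str.len (PySem.Int.toStr |PySem.List.pyGetD row ((j : Int)) 0|) + 1)) 0]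
    simp only [slenA_eq, PySem.List.pyGetD_natCast]
    rw [show (List.foldl (fun acc row => max acc (slen (List.getD row j 0))) 0 (r0 :: rest))
        = List.foldl (fun acc x => max acc (slen x)) 0 ((r0 :: rest).map (fun r => r.getD j 0)) from
      by rw [List.foldl_map]]
    simp only [List.map_cons]
    rw [column_width]
    rw [strlen_toStr, strlen_toStr]
    have hjlen : j < r0.length := by
      have := hj1
      simp [PySem.List.length_pyRange_one] at this
      exact this
    have hjm : j < (rest.foldl (fun l row => (l.zip row).map (fun ab => min ab.1 ab.2)) r0).length := by
      rw [hmin.1]; exact hjlen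
    have hjx : j < (rest.foldl (fun l row => (l.zip row).map (fun ab => max ab.1 ab.2)) r0).length := by
      rw [hmax.1]; exact hjlen
    rw [hmin.2 j hjm hjlen, hmax.2 j hjx hjlen]
    rw [List.getD_eq_getElem r0 0 hjlen]
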